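-- pv_equiv track=rewrite | github.com/BrettRey/erdos-problem-993 | analyze_no_mlsv.py | find_min_maximal_is
-- ===== SOURCE A (Python) =====
-- def find_min_maximal_is(n, adj):
--     """Find the minimum size maximal IS (independent domination number)."""
--     nbr = [set(adj[v]) for v in range(n)]
--     best = [n + 1]
--
--     def backtrack(v, current, forbidden):
--         if v == n:
--             s = frozenset(current)
--             can_extend = any(u not in s and not (nbr[u] & s) for u in range(n))
--             if not can_extend:
--                 best[0] = min(best[0], len(current))
--             return
--         if len(current) >= best[0]:  # prune
--             return
--         backtrack(v + 1, current, forbidden)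
--         if v not in forbidden:
--             backtrack(v + 1, current + [v], forbidden | nbr[v])
--
--     backtrack(0, [], set())
--     return best[0]
-- ===== SOURCE B (Python) =====
-- def _indep(s, nbr):
--     # s is strictly increasing, so this checks: for u before w in s, w not in nbr[u]
--     t = s
--     while t:
--         u, t = t[0], t[1:]
--         if any(w in nbr[u] for w in t):
--             return False
--     return True
--
--
-- def _maximal(n, nbr, s):
--     return all(u in s or any(x in s for x in nbr[u]) for u in range(n))
--
--
-- def find_min_maximal_is(n, adj):
--     """Find the minimum size maximal IS (independent domination number)."""
--     nbr = [adj[v] for v in range(n)]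
--     # all subsets of range(n) as sorted lists, by iterative doubling
--     # (vertex 0 added last, i.e. most significant)
--     subsets = [[]]
--     for v in range(n - 1, -1, -1):
--         subsets = subsets + [[v] + s for s in subsets]
--     best = n + 1
--     for s in subsets:
--         if _indep(s, nbr):
--             if _maximal(n, nbr, s):
--                 best = min(best, len(s))
--     return best
-- ===== Notes on version B (the rewrite author's own statement) =====
-- stated objective: alternative
-- what changed: Replaces A's pruned depth-first backtracking (recursion threading a forbidden set and a mutable running best) by a flat enumeration: all subsets of range(n) are materialised once by iterative doubling and the minimum size is taken over those passing an explicit pairwise-independence test and maximality test.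
import Mathlib
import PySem

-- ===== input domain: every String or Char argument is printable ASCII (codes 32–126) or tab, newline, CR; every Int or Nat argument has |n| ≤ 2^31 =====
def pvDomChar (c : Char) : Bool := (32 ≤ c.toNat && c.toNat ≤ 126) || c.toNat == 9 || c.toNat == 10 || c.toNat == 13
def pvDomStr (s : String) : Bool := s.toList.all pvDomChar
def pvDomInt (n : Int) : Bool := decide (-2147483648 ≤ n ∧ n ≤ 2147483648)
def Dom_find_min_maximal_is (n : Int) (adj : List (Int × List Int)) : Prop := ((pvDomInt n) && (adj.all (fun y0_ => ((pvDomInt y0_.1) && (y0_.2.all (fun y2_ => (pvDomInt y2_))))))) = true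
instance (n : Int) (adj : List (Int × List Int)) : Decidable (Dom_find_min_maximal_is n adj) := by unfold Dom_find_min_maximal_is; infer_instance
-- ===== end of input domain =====

-- B replaces A's pruned depth-first backtracking (mutable best, forbidden-set threading) by a
-- flat enumeration: it materialises all subsets of range(n) by iterative doubling and takes the
-- minimum size over those passing an explicit pairwise-independence and maximality test
-- (objective: alternative structure, not speed).

-- ===== PORT A =====
-- nbr = [set(adj[v]) for v in range(n)]: fetch adj[v] for v = 0,1,… in order; none = the
-- KeyError Python raises at the first missing vertex (excluded by Pre_)
def pvA_nbr (adj : List (Int × List Int)) : Nat → Int → Option (List (PySem.Set Int))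
  | 0, _ => some []
  | k + 1, v =>
    match (PySem.Dict.mk adj).get? v with
    | none => none
    | some l => (pvA_nbr adj k (v + 1)).map (fun rest => PySem.Set.ofList l :: rest)

-- any(u not in s and not (nbr[u] & s) for u in range(n)) with s = frozenset(current)
def pvA_canExt (n : Int) (nbrL : List (PySem.Set Int)) (current : List Int) : Bool :=
  let s := PySem.Set.ofList current
  (PySem.List.pyRange 0 n 1).any (fun u =>
    !(PySem.Set.contains s u) && (PySem.Set.inter (PySem.List.pyGetD nbrL u []) s).isEmpty)

-- backtrack(v, current, forbidden), with the mutable best threaded through; gas is fuel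
-- (n - v at the top-level call), the | 0 fallback is never reached from the top-level call.
def pvA_bt (n : Int) (nbrL : List (PySem.Set Int)) :
    Nat → Int → List Int → PySem.Set Int → Int → Int
  | gas, v, current, forbidden, best =>
    if v = n then
      if pvA_canExt n nbrL current then best
      else min best (current.length : Int)
    else if best ≤ (current.length : Int) then best
    else
      match gas with
      | 0 => best
      | g + 1 =>
        let b1 := pvA_bt n nbrL g (v + 1) current forbidden best
        if PySem.Set.contains forbidden v then b1
        else pvA_bt n nbrL g (v + 1) (current ++ [v])
               (PySem.Set.union forbidden (PySem.List.pyGetD nbrL v [])) b1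

def find_min_maximal_is (n : Int) (adj : List (Int × List Int)) : Int :=
  match pvA_nbr adj n.toNat 0 with
  | none => 0   -- Python raises KeyError here (outside Pre_)
  | some nbrL => pvA_bt n nbrL n.toNat 0 [] PySem.Set.empty (n + 1)

-- ===== PORT B =====
-- nbr = [adj[v] for v in range(n)] (same KeyError domain as A, excluded by Pre_)
def pvB_nbr (adj : List (Int × List Int)) : Nat → Int → Option (List (List Int))
  | 0, _ => some []
  | k + 1, v =>
    match (PySem.Dict.mk adj).get? v with
    | none => none
    | some l => (pvB_nbr adj k (v + 1)).map (fun rest => l :: rest)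

-- _indep: the while loop peeling t[0], t[1:]
def pvB_indep (nbr : List (List Int)) : List Int → Bool
  | [] => true
  | u :: t =>
    if t.any (fun w => (PySem.List.pyGetD nbr u []).contains w) then false
    else pvB_indep nbr t

-- _maximal
def pvB_maximal (n : Int) (nbr : List (List Int)) (s : List Int) : Bool :=
  (PySem.List.pyRange 0 n 1).all (fun u =>
    s.contains u || (PySem.List.pyGetD nbr u []).any (fun x => s.contains x))

def find_min_maximal_is_alt (n : Int) (adj : List (Int × List Int)) : Int :=
  match pvB_nbr adj n.toNat 0 with
  | none => 0   -- Python raises KeyError here (outside Pre_)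
  | some nbr =>
    let subsets := (PySem.List.pyRange (n - 1) (-1) (-1)).foldl
      (fun subs v => subs ++ subs.map (fun s => v :: s)) [[]]
    subsets.foldl (fun best s =>
      if pvB_indep nbr s then
        if pvB_maximal n nbr s then min best (s.length : Int) else best
      else best) (n + 1)

-- ===== PRECONDITION & SPEC =====
-- Pre_: Python A raises KeyError iff some vertex 0 ≤ v < n has no entry in adj; nothing else.
-- The range is bounded by adj.length + 1 only to keep the predicate cheaply decidable for huge n:
-- this excludes nothing A returns on, since adj cannot contain more than adj.length distinct keys,
-- and under the first conjunct min n (adj.length + 1) = n.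
def Pre_find_min_maximal_is (n : Int) (adj : List (Int × List Int)) : Prop :=
  n ≤ (adj.length : Int) + 1 ∧
    ∀ v ∈ PySem.List.pyRange 0 (min n ((adj.length : Int) + 1)) 1,
      ((PySem.Dict.mk adj).get? v).isSome = true
instance (n : Int) (adj : List (Int × List Int)) : Decidable (Pre_find_min_maximal_is n adj) := by
  unfold Pre_find_min_maximal_is; infer_instance

def pvWitness_find_min_maximal_is : Int × (List (Int × List Int)) :=
  (3, [(0, [1]), (1, [0, 2]), (2, [1])])

def Spec_find_min_maximal_is (n : Int) (adj : List (Int × List Int)) (out : Int) : Prop :=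
  out = find_min_maximal_is_alt n adj
instance (n : Int) (adj : List (Int × List Int)) (out : Int) :
    Decidable (Spec_find_min_maximal_is n adj out) := by
  unfold Spec_find_min_maximal_is; infer_instance

-- ===== CLAIM (what is proved, stated in full; the proofs are below) =====
def Claim_equal_find_min_maximal_is : Prop :=
  ∀ (n : Int) (adj : List (Int × List Int)), Dom_find_min_maximal_is n adj →
    Pre_find_min_maximal_is n adj →
    Spec_find_min_maximal_is n adj (find_min_maximal_is n adj)

-- ===== LEMMAS AND PROOFS =====

-- adj[v] as a total function (under Pre_ the lookup always succeeds)
def pvAdjL (adj : List (Int × List Int)) (v : Int) : List Int :=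
  ((PySem.Dict.mk adj).get? v).getD []

def pvA_adjSet (adj : List (Int × List Int)) (v : Int) : PySem.Set Int :=
  PySem.Set.ofList (pvAdjL adj v)

-- all subsets of the integer interval [v, v+g), as increasing lists; the second summand
-- (v taken) comes after the first (v skipped), matching both programs' enumeration order
def pvSubs : Nat → Int → List (List Int)
  | 0, _ => [[]]
  | g + 1, v => pvSubs g (v + 1) ++ (pvSubs g (v + 1)).map (fun s => v :: s)

-- the sequential-independence test A's recursion performs while building `current`
def pvOkSeq (nbrL : List (PySem.Set Int)) : PySem.Set Int → List Int → Bool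
  | _, [] => true
  | forb, u :: t =>
    !(PySem.Set.contains forb u) &&
      pvOkSeq nbrL (PySem.Set.union forb (PySem.List.pyGetD nbrL u [])) t

def pvFoldMin (c : Nat) (best : Int) (l : List (List Int)) : Int :=
  l.foldl (fun b T => min b ((c : Int) + (T.length : Int))) best

theorem pvFoldMin_of_ge (l : List (List Int)) (c : Nat) (best : Int)
    (h : best ≤ (c : Int)) : pvFoldMin c best l = best := by
  induction l with
  | nil => rfl
  | cons T t ih =>
    unfold pvFoldMin at *
    simp only [List.foldl_cons]
    rw [min_eq_left (by have : (0:Int) ≤ T.length := Int.natCast_nonneg _; omega)]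
    exact ih

theorem pvB_nbr_eq (adj : List (Int × List Int)) :
    ∀ (k : Nat) (v : Int),
      (∀ u : Int, v ≤ u → u < v + k → ((PySem.Dict.mk adj).get? u).isSome = true) →
      pvB_nbr adj k v =
        some ((PySem.List.pyRange v (v + k) 1).map (fun u => pvAdjL adj u)) := by
  intro k
  induction k with
  | zero =>
    intro v _
    rw [show v + ((0:Nat):Int) = v by omega, PySem.List.pyRange_one_eq_nil (le_refl v)]
    rfl
  | succ k ih =>
    intro v h
    have hv : ((PySem.Dict.mk adj).get? v).isSome = true := h v (le_refl v) (by omega)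
    obtain ⟨l, hl⟩ := Option.isSome_iff_exists.1 hv
    rw [show v + (((k + 1 : Nat)) : Int) = (v + 1) + (k : Int) by omega]
    rw [PySem.List.pyRange_one_cons (by omega), List.map_cons]
    show (match (PySem.Dict.mk adj).get? v with
      | none => none
      | some l => (pvB_nbr adj k (v + 1)).map (fun rest => l :: rest)) = _
    rw [hl, ih (v + 1) (fun u h1 h2 => h u (by omega) (by omega))]
    simp only [Option.map_some]
    congr 2
    simp [pvAdjL, hl]

theorem pvA_nbr_eq (adj : List (Int × List Int)) :
    ∀ (k : Nat) (v : Int),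
      (∀ u : Int, v ≤ u → u < v + k → ((PySem.Dict.mk adj).get? u).isSome = true) →
      pvA_nbr adj k v =
        some ((PySem.List.pyRange v (v + k) 1).map (fun u => pvA_adjSet adj u)) := by
  intro k
  induction k with
  | zero =>
    intro v _
    rw [show v + ((0:Nat):Int) = v by omega, PySem.List.pyRange_one_eq_nil (le_refl v)]
    rfl
  | succ k ih =>
    intro v h
    have hv : ((PySem.Dict.mk adj).get? v).isSome = true := h v (le_refl v) (by omega)
    obtain ⟨l, hl⟩ := Option.isSome_iff_exists.1 hv
    rw [show v + (((k + 1 : Nat)) : Int) = (v + 1) + (k : Int) by omega]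
    rw [PySem.List.pyRange_one_cons (by omega), List.map_cons]
    show (match (PySem.Dict.mk adj).get? v with
      | none => none
      | some l => (pvA_nbr adj k (v + 1)).map (fun rest => PySem.Set.ofList l :: rest)) = _
    rw [hl, ih (v + 1) (fun u h1 h2 => h u (by omega) (by omega))]
    simp only [Option.map_some]
    congr 2
    simp [pvA_adjSet, pvAdjL, hl]

theorem pv_mem_pvSubs_bound : ∀ (g : Nat) (v : Int) (T : List Int), T ∈ pvSubs g v →
    ∀ x ∈ T, v ≤ x ∧ x < v + g := by
  intro g
  induction g with
  | zero => intro v T hT x hx; simp [pvSubs] at hT; subst hT; simp at hx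
  | succ g ih =>
    intro v T hT x hx
    simp only [pvSubs, List.mem_append, List.mem_map] at hT
    rcases hT with hT | ⟨s, hs, rfl⟩
    · have := ih (v + 1) T hT x hx; omega
    · rcases List.mem_cons.1 hx with rfl | hx'
      · omega
      · have := ih (v + 1) s hs x hx'; omega

theorem pvA_bt_eq (n : Int) (nbrL : List (PySem.Set Int)) :
    ∀ (g : Nat) (v : Int) (cur : List Int) (forb : PySem.Set Int) (best : Int),
      v + g = n →
      pvA_bt n nbrL g v cur forb best =
        pvFoldMin cur.length best
          ((pvSubs g v).filter
            (fun T => pvOkSeq nbrL forb T && !pvA_canExt n nbrL (cur ++ T))) := by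
  intro g
  induction g with
  | zero =>
    intro v cur forb best hv
    have hvn : v = n := by omega
    rw [pvA_bt, if_pos hvn]
    simp only [pvSubs, List.filter, pvOkSeq, Bool.true_and, List.append_nil]
    cases hc : pvA_canExt n nbrL cur
    · simp [pvFoldMin]
    · simp [pvFoldMin]
  | succ g ih =>
    intro v cur forb best hv
    have hvn : ¬ (v = n) := by omega
    rw [pvA_bt, if_neg hvn]
    by_cases hp : best ≤ (cur.length : Int)
    · rw [if_pos hp]
      rw [pvFoldMin_of_ge _ _ _ hp]
    · rw [if_neg hp]
      simp only []
      have ih1 := ih (v + 1) cur forb best (by omega)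
      rw [ih1]
      simp only [pvSubs, List.filter_append, List.filter_map]
      unfold pvFoldMin
      rw [List.foldl_append]
      cases hf : PySem.Set.contains forb v
      · -- v allowed: second branch is the recursive call with cur ++ [v]
        have ih2 := ih (v + 1) (cur ++ [v]) (PySem.Set.union forb (PySem.List.pyGetD nbrL v []))
          (List.foldl (fun b T => min b ((cur.length : Int) + (T.length : Int))) best
            ((pvSubs g (v + 1)).filter (fun T => pvOkSeq nbrL forb T && !pvA_canExt n nbrL (cur ++ T))))
          (by omega)
        rw [ih2]
        unfold pvFoldMin
        rw [List.foldl_map]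
        simp only [Bool.false_eq_true, if_false]
        have hfun : (fun (x : Int) (y : List Int) => min x ((cur.length : Int) + ((v :: y).length : Int)))
            = (fun (b : Int) (T : List Int) => min b (((cur ++ [v]).length : Int) + (T.length : Int))) := by
          funext b T
          congr 1
          simp only [List.length_append, List.length_cons, List.length_nil]
          omega
        have hpred : ((fun T => pvOkSeq nbrL forb T && !pvA_canExt n nbrL (cur ++ T)) ∘ fun s => v :: s)
            = (fun T => pvOkSeq nbrL (forb.union (PySem.List.pyGetD nbrL v [])) T &&
                !pvA_canExt n nbrL (cur ++ [v] ++ T)) := by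
          funext T
          show (pvOkSeq nbrL forb (v :: T) && !pvA_canExt n nbrL (cur ++ v :: T)) = _
          rw [List.append_cons]
          simp only [pvOkSeq, hf, Bool.not_false, Bool.true_and]
        rw [hfun, hpred]
      · -- v forbidden: mapped branch filters to nothing
        have : ∀ T, (pvOkSeq nbrL forb (v :: T) && !pvA_canExt n nbrL (cur ++ v :: T)) = false := by
          intro T
          simp only [pvOkSeq, hf, Bool.not_true, Bool.false_and]
        simp only [Function.comp_def, this]
        simp [List.filter_false]

theorem pvSubs_fold (step : List (List Int) → Int → List (List Int))
    (hstep : step = fun subs v => subs ++ subs.map (fun s => v :: s)) :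
    ∀ (k g : Nat),
      (PySem.List.pyRange ((k : Int) - 1) (-1) (-1)).foldl step (pvSubs g (k : Int)) =
        pvSubs (g + k) 0 := by
  intro k
  induction k with
  | zero => intro g; rw [PySem.List.pyRange_neg_one_eq_nil (by norm_num)]; simp
  | succ k ih =>
    intro g
    rw [show (((k + 1 : Nat) : Int) - 1) = (k : Int) by omega]
    rw [PySem.List.pyRange_neg_one_cons (by have := Int.natCast_nonneg k; omega)]
    simp only [List.foldl_cons]
    have hs : step (pvSubs g ((k + 1 : Nat) : Int)) (k : Int) = pvSubs (g + 1) (k : Int) := by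
      rw [hstep]
      show _ = pvSubs (g + 1) (k : Int)
      simp only [pvSubs]
      norm_num
    rw [hs, ih (g + 1)]
    congr 1
    omega

theorem pvOkSeq_eq (n : Int) (adj : List (Int × List Int)) :
    ∀ (T : List Int) (forb : PySem.Set Int),
      (∀ x ∈ T, 0 ≤ x ∧ x < n) →
      pvOkSeq ((PySem.List.pyRange 0 n 1).map (fun v => pvA_adjSet adj v)) forb T =
        ((T.all (fun x => !(PySem.Set.contains forb x))) &&
          pvB_indep ((PySem.List.pyRange 0 n 1).map (fun v => pvAdjL adj v)) T) := by
  intro T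
  induction T with
  | nil => intro forb h; rfl
  | cons u t ih =>
    intro forb h
    have hu := h u (List.mem_cons_self ..)
    have hget : PySem.List.pyGetD ((PySem.List.pyRange 0 n 1).map (fun v => pvA_adjSet adj v)) u []
        = pvA_adjSet adj u :=
      PySem.List.pyGetD_map_pyRange_of_nonneg _ n u [] hu.1 hu.2
    have hgetB : PySem.List.pyGetD ((PySem.List.pyRange 0 n 1).map (fun v => pvAdjL adj v)) u []
        = pvAdjL adj u :=
      PySem.List.pyGetD_map_pyRange_of_nonneg _ n u [] hu.1 hu.2
    simp only [pvOkSeq, pvB_indep, hget, hgetB]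
    rw [ih _ (fun x hx => h x (List.mem_cons_of_mem _ hx))]
    rw [show ∀ (c x : Bool), (if c = true then false else x) = (!c && x) from by decide]
    rw [Bool.eq_iff_iff]
    simp only [Bool.and_eq_true, Bool.not_eq_true', List.all_eq_true, PySem.Set.contains,
      List.any_eq_true, PySem.Set.mem_union, pvA_adjSet,
      PySem.Set.mem_ofList, Bool.not_eq_true, List.mem_cons,
      decide_eq_false_iff_not, List.any_eq_false, List.contains_eq_mem]
    constructor
    · rintro ⟨h1, h2, h3⟩
      refine ⟨fun x hx => ?_, fun x hx hc => (h2 x hx) (Or.inr hc), h3⟩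
      rcases hx with rfl | hxt
      · exact h1
      · exact fun hc => (h2 x hxt) (Or.inl hc)
    · rintro ⟨h1, h2, h3⟩
      refine ⟨h1 u (Or.inl rfl), fun x hx => ?_, h3⟩
      push_neg
      exact ⟨h1 x (Or.inr hx), h2 x hx⟩

theorem pv_canExt_eq (n : Int) (adj : List (Int × List Int)) (T : List Int) :
    (!pvA_canExt n ((PySem.List.pyRange 0 n 1).map (fun v => pvA_adjSet adj v)) T) =
      pvB_maximal n ((PySem.List.pyRange 0 n 1).map (fun v => pvAdjL adj v)) T := by
  simp only [pvA_canExt, pvB_maximal]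
  rw [Bool.eq_iff_iff]
  simp only [Bool.not_eq_true', List.any_eq_false, List.all_eq_true]
  apply forall_congr'
  intro u
  apply imp_congr_right
  intro hu
  have hb := (PySem.List.mem_pyRange_one).1 hu
  rw [PySem.List.pyGetD_map_pyRange_of_nonneg _ n u [] hb.1 hb.2]
  rw [PySem.List.pyGetD_map_pyRange_of_nonneg _ n u [] hb.1 hb.2]
  rw [show ∀ (a b : Bool), (¬(!a && b) = true ↔ (a || !b) = true) from by decide]
  simp only [Bool.or_eq_true, Bool.not_eq_true', PySem.Set.contains, PySem.Set.mem_ofList,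
    List.isEmpty_eq_false_iff, List.any_eq_true, pvA_adjSet, PySem.Set.inter, ne_eq,
    List.filter_eq_nil_iff, List.contains_eq_mem]
  constructor
  · rintro (h | h)
    · exact Or.inl h
    · right
      push_neg at h
      obtain ⟨x, hx, hxs⟩ := h
      exact ⟨x, hx, hxs⟩
  · rintro (h | ⟨x, hx, hxs⟩)
    · exact Or.inl h
    · right; push_neg; exact ⟨x, hx, hxs⟩

theorem pv_final (n : Int) (adj : List (Int × List Int))
    (hpre : Pre_find_min_maximal_is n adj) :
    find_min_maximal_is n adj = find_min_maximal_is_alt n adj := by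
  have hsome : ∀ u : Int, 0 ≤ u → u < n → ((PySem.Dict.mk adj).get? u).isSome = true := by
    intro u h1 h2
    refine hpre.2 u ?_
    rw [PySem.List.mem_pyRange_one]
    constructor
    · exact h1
    · have := hpre.1; omega
  by_cases hn : 0 ≤ n
  · unfold find_min_maximal_is find_min_maximal_is_alt
    have hg : ((n.toNat : Int)) = n := Int.toNat_of_nonneg hn
    rw [pvA_nbr_eq adj n.toNat 0 (fun u h1 h2 => hsome u h1 (by omega)),
        pvB_nbr_eq adj n.toNat 0 (fun u h1 h2 => hsome u h1 (by omega))]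
    rw [show (0 : Int) + (n.toNat : Int) = n by omega]
    set nbrL := (PySem.List.pyRange 0 n 1).map (fun v => pvA_adjSet adj v) with hnbrL
    set nbrB := (PySem.List.pyRange 0 n 1).map (fun v => pvAdjL adj v) with hnbrB
    show pvA_bt n nbrL n.toNat 0 [] PySem.Set.empty (n + 1) = _
    rw [pvA_bt_eq n nbrL n.toNat 0 [] PySem.Set.empty (n + 1) (by omega)]
    have hsubs : (PySem.List.pyRange (n - 1) (-1) (-1)).foldl
        (fun subs v => subs ++ subs.map (fun s => v :: s)) [[]] = pvSubs n.toNat 0 := by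
      have := pvSubs_fold (fun subs v => subs ++ subs.map (fun s => v :: s)) rfl n.toNat 0
      rw [hg] at this
      simpa using this
    rw [hsubs]
    have hfilter : (pvSubs n.toNat 0).filter
          (fun T => pvOkSeq nbrL PySem.Set.empty T && !pvA_canExt n nbrL ([] ++ T)) =
        (pvSubs n.toNat 0).filter
          (fun T => pvB_indep nbrB T && pvB_maximal n nbrB T) := by
      apply List.filter_congr
      intro T hT
      have hbound : ∀ x ∈ T, 0 ≤ x ∧ x < n := by
        intro x hx
        have := pv_mem_pvSubs_bound n.toNat 0 T hT x hx
        omega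
      rw [List.nil_append, pvOkSeq_eq n adj T PySem.Set.empty hbound, pv_canExt_eq n adj T]
      have : T.all (fun x => !(PySem.Set.contains PySem.Set.empty x)) = true := by
        simp [PySem.Set.contains, PySem.Set.empty]
      rw [this, Bool.true_and]
    rw [hfilter]
    unfold pvFoldMin
    rw [List.foldl_filter]
    apply PySem.List.foldl_congr_mem
    intro acc T _
    simp only [List.length_nil, Nat.cast_zero, zero_add]
    cases h1 : pvB_indep nbrB T <;> cases h2 : pvB_maximal n nbrB T <;> simp
  · push_neg at hn
    unfold find_min_maximal_is find_min_maximal_is_alt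
    rw [show n.toNat = 0 from Int.toNat_of_nonpos (by omega)]
    show pvA_bt n [] 0 0 [] PySem.Set.empty (n + 1) = _
    rw [pvA_bt, if_neg (by omega), if_pos (by simp; omega)]
    rw [PySem.List.pyRange_neg_one_eq_nil (by omega)]
    simp only [List.foldl_nil, List.foldl_cons]
    have hmax : pvB_maximal n [] [] = true := by
      unfold pvB_maximal
      rw [PySem.List.pyRange_one_eq_nil (by omega)]
      rfl
    rw [show pvB_nbr adj 0 0 = some [] from rfl]
    simp only [show pvB_indep [] [] = true from rfl, hmax, if_true, List.length_nil,
      Nat.cast_zero]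
    rw [min_eq_left (by omega)]

-- ===== VERDICT (by name: the statement is the Claim_ definition above) =====
theorem find_min_maximal_is_spec : Claim_equal_find_min_maximal_is := by
  intro n adj _ hpre
  unfold Spec_find_min_maximal_is
  exact pv_final n adj hpre
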